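-- pv_equiv track=rewrite | github.com/jerrywang1201/AI_ChatBot | code/bin/tstt_excel.py | replace_for_filepath
-- ===== SOURCE A (Python) =====
-- def replace_for_filepath(to_replace: str) -> str:
--     """
--     Replaces any characters that need replacing to be used in file path
--
--     :param str to_replace: string to replace characters in
--
--     :return: str with unsafe characters replaced
--     """
--     replacements = {
--         ':': '|',
--         ' ': '_',
--         '/': '-'
--     }
--     char_list = []
--
--     for character in to_replace:
--         if character in replacements:
--             char_list.append(replacements[character])
--         else:
--             char_list.append(character)
--
--     return ''.join(char_list)
-- ===== SOURCE B (Python) =====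
-- def replace_for_filepath(to_replace: str) -> str:
--     """
--     Replaces any characters that need replacing to be used in file path
--
--     :param str to_replace: string to replace characters in
--
--     :return: str with unsafe characters replaced
--     """
--     return to_replace.replace(':', '|').replace(' ', '_').replace('/', '-')
-- ===== Notes on version B (the rewrite author's own statement) =====
-- stated objective: idiomatic
-- what changed: Replaced the per-character loop with a dict lookup and list join by three chained str.replace full-string passes (safe because no replacement character is itself a key).
import Mathlib
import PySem

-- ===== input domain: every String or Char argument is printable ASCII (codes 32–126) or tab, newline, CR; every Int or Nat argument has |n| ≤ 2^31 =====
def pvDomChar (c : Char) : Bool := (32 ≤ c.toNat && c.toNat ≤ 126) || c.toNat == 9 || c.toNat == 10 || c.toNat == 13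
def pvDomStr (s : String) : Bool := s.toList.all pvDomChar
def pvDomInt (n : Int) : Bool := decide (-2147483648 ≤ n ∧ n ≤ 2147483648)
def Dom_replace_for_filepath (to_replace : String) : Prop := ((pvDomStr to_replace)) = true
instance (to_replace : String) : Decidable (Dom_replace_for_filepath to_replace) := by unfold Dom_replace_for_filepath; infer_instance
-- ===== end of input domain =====

-- B replaces A's per-character loop with a dict lookup by three chained full-string str.replace passes (idiomatic; same cost).

-- ===== PORT A =====
def replace_for_filepath (to_replace : String) : String :=
  let replacements : PySem.Dict Char String :=
    PySem.Dict.ofList [(':', "|"), (' ', "_"), ('/', "-")]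
  let char_list : List String :=
    to_replace.toList.foldl (fun acc character =>
      if replacements.contains character then
        acc ++ [replacements.getD character ""]
      else
        acc ++ [String.ofList [character]]) []
  PySem.Str.join "" char_list

-- ===== PORT B =====
def replace_for_filepath_alt (to_replace : String) : String :=
  PySem.Str.replace (PySem.Str.replace (PySem.Str.replace to_replace ":" "|") " " "_") "/" "-"

-- ===== PRECONDITION & SPEC =====
def Spec_replace_for_filepath (to_replace : String) (out : String) : Prop := out = replace_for_filepath_alt to_replace
instance (to_replace : String) (out : String) : Decidable (Spec_replace_for_filepath to_replace out) := by unfold Spec_replace_for_filepath; infer_instance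

-- ===== CLAIM (what is proved, stated in full; the proofs are below) =====
def Claim_equal_replace_for_filepath : Prop := ∀ (to_replace : String), Dom_replace_for_filepath to_replace → Spec_replace_for_filepath to_replace (replace_for_filepath to_replace)

-- ===== LEMMAS AND PROOFS =====

-- the character substitution both programs realize
def pvF (c : Char) : Char := if c = ':' then '|' else if c = ' ' then '_' else if c = '/' then '-' else c

-- A's loop body, written out (definitionally equal to the lambda inside port A)
def pvStep : List String → Char → List String := fun acc character =>
  if (PySem.Dict.ofList [((':' : Char), "|"), (' ', "_"), ('/', "-")]).contains character then
    acc ++ [(PySem.Dict.ofList [((':' : Char), "|"), (' ', "_"), ('/', "-")]).getD character ""]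
  else acc ++ [String.ofList [character]]

theorem pv_dict_lit : PySem.Dict.ofList [((':' : Char), "|"), (' ', "_"), ('/', "-")]
    = PySem.Dict.mk [((':' : Char), "|"), (' ', "_"), ('/', "-")] := by decide

theorem pv_step_eq (acc : List String) (c : Char) :
    pvStep acc c = acc ++ [String.ofList [pvF c]] := by
  unfold pvStep pvF
  rw [pv_dict_lit]
  by_cases h1 : c = ':' <;> by_cases h2 : c = ' ' <;> by_cases h3 : c = '/' <;>
    first
    | (subst h1; rfl)
    | (subst h2; rfl)
    | (subst h3; rfl)
    | (have e1 : (':' == c) = false := by simp [Ne.symm h1]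
       have e2 : ((' ' : Char) == c) = false := by simp [Ne.symm h2]
       have e3 : (('/' : Char) == c) = false := by simp [Ne.symm h3]
       simp [PySem.Dict.contains_mk, e1, e2, e3, h1, h2, h3])

theorem pv_foldl (l : List Char) (acc : List String) :
    l.foldl pvStep acc = acc ++ l.map (fun c => String.ofList [pvF c]) := by
  induction l generalizing acc with
  | nil => simp
  | cons c t ih => simp [pv_step_eq, ih]

theorem pv_join_nil (ps : List (List Char)) : PySem.Chars.join [] ps = ps.flatten := by
  induction ps with
  | nil => rfl
  | cons a t ih =>
    cases t with
    | nil => simp [PySem.Chars.join, List.intercalate]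
    | cons b u =>
      simp only [PySem.Chars.join, List.intercalate, List.intersperse] at *
      simp [ih]

-- replacing a single character by a single character is a map over the characters
theorem pv_go_single (o n : Char) : ∀ (l acc : List Char),
    PySem.Chars.replace.go [o] [n] l.length l acc
      = acc.reverse ++ l.map (fun c => if c = o then n else c) := by
  intro l
  induction l with
  | nil => intro acc; simp [PySem.Chars.replace.go]
  | cons c t ih =>
    intro acc
    show PySem.Chars.replace.go [o] [n] (t.length + 1) (c :: t) acc = _
    rw [PySem.Chars.replace.go]
    by_cases h : c = o
    · subst h
      simp [List.isPrefixOf, ih]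
    · have hpre : [o].isPrefixOf (c :: t) = false := by
        simp [List.isPrefixOf]
        exact fun he => (h he.symm).elim
      simp [hpre, h, ih]

theorem pv_replace_single (s : List Char) (o n : Char) :
    PySem.Chars.replace s [o] [n] = s.map (fun c => if c = o then n else c) := by
  rw [PySem.Chars.replace]
  simp [pv_go_single]

theorem pv_comp_eq (c : Char) :
    (if (if (if c = ':' then '|' else c) = ' ' then '_' else if c = ':' then '|' else c) = '/'
       then '-'
       else if (if c = ':' then '|' else c) = ' ' then '_' else if c = ':' then '|' else c)
      = pvF c := by
  unfold pvF
  by_cases h1 : c = ':' <;> by_cases h2 : c = ' ' <;> by_cases h3 : c = '/' <;> simp_all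

theorem pv_alt_toList (s : String) :
    (replace_for_filepath_alt s).toList = s.toList.map pvF := by
  unfold replace_for_filepath_alt
  rw [PySem.Str.toList_replace, PySem.Str.toList_replace, PySem.Str.toList_replace]
  show PySem.Chars.replace (PySem.Chars.replace (PySem.Chars.replace s.toList [':'] ['|']) [' '] ['_']) ['/'] ['-'] = _
  rw [pv_replace_single, pv_replace_single, pv_replace_single, List.map_map, List.map_map]
  exact List.map_congr_left fun c _ => pv_comp_eq c

theorem pv_main (s : String) : replace_for_filepath s = replace_for_filepath_alt s := by
  apply String.toList_inj.mp
  rw [pv_alt_toList]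
  show (PySem.Str.join "" (s.toList.foldl pvStep [])).toList = _
  rw [PySem.Str.toList_join, pv_foldl]
  show PySem.Chars.join [] _ = _
  rw [pv_join_nil]
  induction s.toList with
  | nil => rfl
  | cons c t ih => simp_all [Function.comp_def]

-- ===== VERDICT (by name: the statement is the Claim_ definition above) =====
theorem replace_for_filepath_spec : Claim_equal_replace_for_filepath := by
  intro s _
  exact pv_main s
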